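-- pv_equiv track=rewrite | github.com/NKalavros/scMEDALTpy | ComputeDistance_optimized.py | zerodisthelper_optimized
-- ===== SOURCE A (Python) =====
-- from collections import deque
--
-- def distcalc_optimized(node1, node2):
--     """Optimized MED distance calculation"""
--     if len(node1) != len(node2):
--         raise ValueError("Segments must have same length")
--
--     if len(node1) == 1:
--         return abs(node1[0] - node2[0])
--
--     # Use deque for efficient operations
--     diff_list = deque([node1[i] - node2[i] for i in range(len(node1))])
--
--     d = 0
--     while diff_list:
--         if diff_list[0] == 0:
--             diff_list.popleft()
--         elif diff_list[0] > 0: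
--             # Find consecutive positive values
--             k = 0
--             for i in range(len(diff_list)):
--                 if diff_list[i] > 0:
--                     k = i
--                 else:
--                     break
--
--             # Subtract 1 from all positive values
--             for i in range(k + 1):
--                 diff_list[i] -= 1
--             d += 1
--         elif diff_list[0] < 0:
--             # Find consecutive negative values
--             k = 0
--             for i in range(len(diff_list)):
--                 if diff_list[i] < 0:
--                     k = i
--                 else:
--                     break
--
--             # Add 1 to all negative values
--             for i in range(k + 1):
--                 diff_list[i] += 1
--             d += 1
--
--     return d
--
-- def zerodisthelper_optimized(node1, node2):
--     """Optimized zero distance helper"""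
--     # Use lists instead of deep copy for better performance
--     n1 = list(node1)
--     n2 = list(node2)
--     temp1 = []
--     temp2 = []
--
--     for i in range(len(n1)):
--         x1 = n1[i]
--         x2 = n2[i]
--         if x1 == 0:
--             if x2 == 0:
--                 temp1.append(x1)
--                 temp2.append(x2)
--             else:
--                 return 1000000
--         else:
--             temp1.append(x1)
--             temp2.append(x2)
--
--     return distcalc_optimized(temp1, temp2)
-- ===== SOURCE B (Python) =====
-- def zerodisthelper_optimized(node1, node2):
--     total = 0
--     prev = 0
--     for a, b in zip(node1, node2):
--         if a == 0 and b != 0: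
--             return 1000000
--         d = a - b
--         if d > 0:
--             total += max(0, d - max(prev, 0))
--         elif d < 0:
--             total += max(0, -d + min(prev, 0))
--         prev = d
--     return total
-- ===== Notes on version B (the rewrite author's own statement) =====
-- stated objective: faster
-- what changed: A simulates the MED operations one by one (each loop iteration decrements/increments a same-sign prefix of the difference deque by 1, so the work is proportional to the copy-number magnitudes); B computes the same count in one O(n) pass over the zipped lists, adding for each position the positive jump of the difference relative to the previous difference (and returns 1000000 at the first position with node1[i]==0 != node2[i], as A does).
import Mathlib
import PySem

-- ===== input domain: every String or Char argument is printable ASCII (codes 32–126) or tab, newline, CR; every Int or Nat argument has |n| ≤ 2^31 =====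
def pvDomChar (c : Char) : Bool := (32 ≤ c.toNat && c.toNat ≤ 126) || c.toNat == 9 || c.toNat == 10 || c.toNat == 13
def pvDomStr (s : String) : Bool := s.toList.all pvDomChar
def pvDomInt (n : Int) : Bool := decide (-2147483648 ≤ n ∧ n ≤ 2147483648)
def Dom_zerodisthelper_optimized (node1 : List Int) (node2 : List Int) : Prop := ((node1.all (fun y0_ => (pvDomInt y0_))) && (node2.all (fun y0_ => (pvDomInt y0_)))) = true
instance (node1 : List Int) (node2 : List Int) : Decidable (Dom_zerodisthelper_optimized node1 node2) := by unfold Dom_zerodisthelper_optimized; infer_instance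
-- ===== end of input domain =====

-- B replaces A's O(n·maxval) simulation of repeated ±1 prefix operations by a single O(n)
-- pass summing the positive jumps of the per-position differences (objective: faster).


-- ===== PORT A =====

-- termination measure for distcalc's while loop: total magnitude plus length
def pvMeasure (ds : List Int) : Nat := (ds.map Int.natAbs).sum + ds.length

theorem pvSumAbs_dec_pos (t : List Int) (h : ∀ y ∈ t, 0 < y) :
    ((t.map (· - 1)).map Int.natAbs).sum + t.length = (t.map Int.natAbs).sum := by
  induction t with
  | nil => simp
  | cons a t ih =>
    have ha := h a (by simp)
    have ht := ih (fun y hy => h y (by simp [hy]))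
    simp only [List.map_cons, List.sum_cons, List.length_cons]
    omega

theorem pvSumAbs_dec_neg (t : List Int) (h : ∀ y ∈ t, y < 0) :
    ((t.map (· + 1)).map Int.natAbs).sum + t.length = (t.map Int.natAbs).sum := by
  induction t with
  | nil => simp
  | cons a t ih =>
    have ha := h a (by simp)
    have ht := ih (fun y hy => h y (by simp [hy]))
    simp only [List.map_cons, List.sum_cons, List.length_cons]
    omega

theorem pvMeasure_dec_pos (x : Int) (rest : List Int) (hx : 0 < x) :
    pvMeasure (((x :: rest).takeWhile (fun y => decide (0 < y))).map (· - 1) ++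
        (x :: rest).dropWhile (fun y => decide (0 < y))) < pvMeasure (x :: rest) := by
  have hsplit : (x :: rest).takeWhile (fun y => decide (0 < y)) ++
      (x :: rest).dropWhile (fun y => decide (0 < y)) = x :: rest :=
    List.takeWhile_append_dropWhile
  have hmem : ∀ y ∈ (x :: rest).takeWhile (fun y => decide (0 < y)), 0 < y := by
    intro y hy
    have := List.mem_takeWhile_imp hy
    simpa using this
  have hne : (x :: rest).takeWhile (fun y => decide (0 < y)) ≠ [] := by
    simp [hx]
  have hsum := pvSumAbs_dec_pos _ hmem
  have hlen : 1 ≤ ((x :: rest).takeWhile (fun y => decide (0 < y))).length :=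
    List.length_pos_iff.mpr hne
  calc pvMeasure (((x :: rest).takeWhile (fun y => decide (0 < y))).map (· - 1) ++
        (x :: rest).dropWhile (fun y => decide (0 < y)))
      < pvMeasure ((x :: rest).takeWhile (fun y => decide (0 < y)) ++
        (x :: rest).dropWhile (fun y => decide (0 < y))) := by
        simp only [pvMeasure, List.map_append, List.sum_append, List.length_append,
          List.length_map]
        omega
    _ = pvMeasure (x :: rest) := by rw [hsplit]

theorem pvMeasure_dec_neg (x : Int) (rest : List Int) (hx : x < 0) :
    pvMeasure (((x :: rest).takeWhile (fun y => decide (y < 0))).map (· + 1) ++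
        (x :: rest).dropWhile (fun y => decide (y < 0))) < pvMeasure (x :: rest) := by
  have hsplit : (x :: rest).takeWhile (fun y => decide (y < 0)) ++
      (x :: rest).dropWhile (fun y => decide (y < 0)) = x :: rest :=
    List.takeWhile_append_dropWhile
  have hmem : ∀ y ∈ (x :: rest).takeWhile (fun y => decide (y < 0)), y < 0 := by
    intro y hy
    have := List.mem_takeWhile_imp hy
    simpa using this
  have hne : (x :: rest).takeWhile (fun y => decide (y < 0)) ≠ [] := by
    simp [hx]
  have hsum := pvSumAbs_dec_neg _ hmem
  have hlen : 1 ≤ ((x :: rest).takeWhile (fun y => decide (y < 0))).length :=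
    List.length_pos_iff.mpr hne
  calc pvMeasure (((x :: rest).takeWhile (fun y => decide (y < 0))).map (· + 1) ++
        (x :: rest).dropWhile (fun y => decide (y < 0)))
      < pvMeasure ((x :: rest).takeWhile (fun y => decide (y < 0)) ++
        (x :: rest).dropWhile (fun y => decide (y < 0))) := by
        simp only [pvMeasure, List.map_append, List.sum_append, List.length_append,
          List.length_map]
        omega
    _ = pvMeasure (x :: rest) := by rw [hsplit]

-- the while loop of distcalc_optimized: pop a zero head, or decrement/increment the
-- maximal same-sign prefix (exactly what the two inner for-loops of A do) and count one op
def dcLoop : List Int → Int → Int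
  | [], d => d
  | x :: rest, d =>
    if _hx : x = 0 then dcLoop rest d
    else if _hp : 0 < x then
      dcLoop (((x :: rest).takeWhile (fun y => decide (0 < y))).map (· - 1) ++
        (x :: rest).dropWhile (fun y => decide (0 < y))) (d + 1)
    else
      dcLoop (((x :: rest).takeWhile (fun y => decide (y < 0))).map (· + 1) ++
        (x :: rest).dropWhile (fun y => decide (y < 0))) (d + 1)
termination_by ds _ => pvMeasure ds
decreasing_by
  · simp only [pvMeasure, List.map_cons, List.sum_cons, List.length_cons]; omega
  · exact pvMeasure_dec_pos _ _ _hp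
  · exact pvMeasure_dec_neg _ _ (by omega)

def distcalc_optimized (node1 node2 : List Int) : Int :=
  if node1.length ≠ node2.length then 0
    -- Python raises ValueError here; unreachable from zerodisthelper_optimized (temp lists have equal length)
  else if node1.length = 1 then |node1.headD 0 - node2.headD 0|
  else dcLoop (List.zipWith (· - ·) node1 node2) 0

-- the for-loop of zerodisthelper_optimized; n1[i] is always in range (i < len n1),
-- n2[i] uses pyGet? (none = Python IndexError, excluded by Pre_)
def zdLoop (n1 n2 : List Int) (i : Nat) (t1 t2 : List Int) : Int :=
  if i < n1.length then
    let x1 := n1.getD i 0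
    match PySem.List.pyGet? n2 (i : Int) with
    | none => 0 -- IndexError in Python; excluded by Pre_
    | some x2 =>
      if x1 = 0 then
        if x2 = 0 then zdLoop n1 n2 (i + 1) (t1 ++ [x1]) (t2 ++ [x2])
        else 1000000
      else zdLoop n1 n2 (i + 1) (t1 ++ [x1]) (t2 ++ [x2])
  else
    distcalc_optimized t1 t2
termination_by n1.length - i

def zerodisthelper_optimized (node1 node2 : List Int) : Int :=
  zdLoop node1 node2 0 [] []

-- ===== PORT B =====

-- cost contributed by one difference d given the previous difference prev
def pvCost (d prev : Int) : Int :=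
  if 0 < d then max 0 (d - max prev 0)
  else if d < 0 then max 0 (-d + min prev 0)
  else 0

def altLoop : List (Int × Int) → Int → Int → Int
  | [], total, _ => total
  | (a, b) :: rest, total, prev =>
    if a = 0 ∧ b ≠ 0 then 1000000
    else altLoop rest (total + pvCost (a - b) prev) (a - b)

def zerodisthelper_optimized_alt (node1 node2 : List Int) : Int :=
  altLoop (node1.zip node2) 0 0

-- ===== PRECONDITION & SPEC =====
-- Pre_ excludes exactly the inputs on which A raises: len(node2) < len(node1) with no earlier
-- position j (readable in both lists) where node1[j]==0 and node2[j]!=0 — there the loop reads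
-- node2[i] out of range (IndexError).
def Pre_zerodisthelper_optimized (node1 : List Int) (node2 : List Int) : Prop :=
  node1.length ≤ node2.length ∨
    ∃ j < node1.length, j < node2.length ∧ node1.getD j 0 = 0 ∧ node2.getD j 0 ≠ 0

instance (node1 : List Int) (node2 : List Int) : Decidable (Pre_zerodisthelper_optimized node1 node2) := by
  unfold Pre_zerodisthelper_optimized; infer_instance

def pvWitness_zerodisthelper_optimized : List Int × List Int := ([1, 2], [0, 1])

def Spec_zerodisthelper_optimized (node1 : List Int) (node2 : List Int) (out : Int) : Prop := out = zerodisthelper_optimized_alt node1 node2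
instance (node1 : List Int) (node2 : List Int) (out : Int) : Decidable (Spec_zerodisthelper_optimized node1 node2 out) := by unfold Spec_zerodisthelper_optimized; infer_instance

-- ===== CLAIM (what is proved, stated in full; the proofs are below) =====
def Claim_equal_zerodisthelper_optimized : Prop := ∀ (node1 : List Int) (node2 : List Int), Dom_zerodisthelper_optimized node1 node2 → Pre_zerodisthelper_optimized node1 node2 → Spec_zerodisthelper_optimized node1 node2 (zerodisthelper_optimized node1 node2)

-- ===== LEMMAS AND PROOFS =====

-- closed form being computed by both sides: sum of pvCost along the difference list
def medFrom : List Int → Int → Int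
  | [], _ => 0
  | x :: rest, prev => pvCost x prev + medFrom rest x

theorem altLoop_eq (pairs : List (Int × Int)) : ∀ (total prev : Int),
    altLoop pairs total prev =
      if pairs.any (fun p => decide (p.1 = 0) && decide (p.2 ≠ 0)) then 1000000
      else total + medFrom (pairs.map (fun p => p.1 - p.2)) prev := by
  induction pairs with
  | nil => simp [altLoop, medFrom]
  | cons p rest ih =>
    intro total prev
    obtain ⟨a, b⟩ := p
    by_cases hm : a = 0 ∧ b ≠ 0
    · simp [altLoop, hm]
    · rw [altLoop, if_neg hm, ih]
      have : ¬ (decide (a = 0) && decide (b ≠ 0)) = true := by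
        simpa using hm
      simp only [List.any_cons, this, Bool.false_or, List.map_cons, medFrom]
      split_ifs <;> ring

-- the first cost is unchanged when both candidate prevs are nonnegative and the head is ≤ 0
theorem medFrom_irrel_pos (tail : List Int) (p q : Int) (hp : 0 ≤ p) (hq : 0 ≤ q)
    (hhd : ∀ t, tail.head? = some t → ¬ 0 < t) : medFrom tail p = medFrom tail q := by
  cases tail with
  | nil => rfl
  | cons t rest =>
    have ht : ¬ 0 < t := hhd t rfl
    have : pvCost t p = pvCost t q := by
      unfold pvCost
      have hminp : min p 0 = 0 := by omega
      have hminq : min q 0 = 0 := by omega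
      rw [hminp, hminq]
      split_ifs <;> omega
    simp [medFrom, this]

theorem medFrom_irrel_neg (tail : List Int) (p q : Int) (hp : p ≤ 0) (hq : q ≤ 0)
    (hhd : ∀ t, tail.head? = some t → ¬ t < 0) : medFrom tail p = medFrom tail q := by
  cases tail with
  | nil => rfl
  | cons t rest =>
    have ht : ¬ t < 0 := hhd t rfl
    have : pvCost t p = pvCost t q := by
      unfold pvCost
      have hmaxp : max p 0 = 0 := by omega
      have hmaxq : max q 0 = 0 := by omega
      rw [hmaxp, hmaxq]
      split_ifs <;> omega
    simp [medFrom, this]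

theorem medFrom_shift_pos (run : List Int) : ∀ (tail : List Int) (p : Int), 0 ≤ p →
    (∀ y ∈ run, 0 < y) → (∀ t, tail.head? = some t → ¬ 0 < t) →
    medFrom (run.map (· - 1) ++ tail) p = medFrom (run ++ tail) (p + 1) := by
  induction run with
  | nil =>
    intro tail p hp _ hhd
    exact medFrom_irrel_pos tail p (p + 1) hp (by omega) hhd
  | cons a run ih =>
    intro tail p hp hrun hhd
    have ha : 0 < a := hrun a (by simp)
    have hrec := ih tail (a - 1) (by omega) (fun y hy => hrun y (by simp [hy])) hhd
    rw [show a - 1 + 1 = a by ring] at hrec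
    have hcost : pvCost (a - 1) p = pvCost a (p + 1) := by
      unfold pvCost
      have h1 : max p 0 = p := by omega
      have h2 : max (p + 1) 0 = p + 1 := by omega
      rw [h1, h2]
      split_ifs <;> omega
    simp only [List.map_cons, List.cons_append, medFrom]
    rw [hcost, hrec]

theorem medFrom_shift_neg (run : List Int) : ∀ (tail : List Int) (p : Int), p ≤ 0 →
    (∀ y ∈ run, y < 0) → (∀ t, tail.head? = some t → ¬ t < 0) →
    medFrom (run.map (· + 1) ++ tail) p = medFrom (run ++ tail) (p - 1) := by
  induction run with
  | nil =>
    intro tail p hp _ hhd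
    exact medFrom_irrel_neg tail p (p - 1) hp (by omega) hhd
  | cons a run ih =>
    intro tail p hp hrun hhd
    have ha : a < 0 := hrun a (by simp)
    have hrec := ih tail (a + 1) (by omega) (fun y hy => hrun y (by simp [hy])) hhd
    rw [show a + 1 - 1 = a by ring] at hrec
    have hcost : pvCost (a + 1) p = pvCost a (p - 1) := by
      unfold pvCost
      have h1 : min p 0 = p := by omega
      have h2 : min (p - 1) 0 = p - 1 := by omega
      rw [h1, h2]
      split_ifs <;> omega
    simp only [List.map_cons, List.cons_append, medFrom]
    rw [hcost, hrec]

-- one positive operation of A's while loop lowers medFrom by exactly 1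
theorem medFrom_op_pos (a : Int) (run tail : List Int) (ha : 0 < a)
    (hrun : ∀ y ∈ run, 0 < y) (hhd : ∀ t, tail.head? = some t → ¬ 0 < t) :
    medFrom ((a :: run) ++ tail) 0 = 1 + medFrom ((a :: run).map (· - 1) ++ tail) 0 := by
  have h1 : pvCost a 0 = a := by unfold pvCost; split_ifs <;> omega
  have h2 : pvCost (a - 1) 0 = a - 1 := by unfold pvCost; split_ifs <;> omega
  have hshift := medFrom_shift_pos run tail (a - 1) (by omega) hrun hhd
  have ha1 : a - 1 + 1 = a := by ring
  simp only [List.cons_append, List.map_cons, medFrom]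
  rw [h1, h2, hshift, ha1]
  ring

theorem medFrom_op_neg (a : Int) (run tail : List Int) (ha : a < 0)
    (hrun : ∀ y ∈ run, y < 0) (hhd : ∀ t, tail.head? = some t → ¬ t < 0) :
    medFrom ((a :: run) ++ tail) 0 = 1 + medFrom ((a :: run).map (· + 1) ++ tail) 0 := by
  have h1 : pvCost a 0 = -a := by unfold pvCost; split_ifs <;> omega
  have h2 : pvCost (a + 1) 0 = -(a + 1) := by unfold pvCost; split_ifs <;> omega
  have hshift := medFrom_shift_neg run tail (a + 1) (by omega) hrun hhd
  have ha1 : a + 1 - 1 = a := by ring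
  simp only [List.cons_append, List.map_cons, medFrom]
  rw [h1, h2, hshift, ha1]
  ring

theorem head?_dropWhile_not {p : Int → Bool} (l : List Int) :
    ∀ t, (l.dropWhile p).head? = some t → ¬ p t = true := by
  induction l with
  | nil => intro t ht; simp [List.dropWhile] at ht
  | cons a rest ih =>
    intro t ht
    rw [List.dropWhile_cons] at ht
    split at ht
    · exact ih t ht
    · next h =>
      simp only [List.head?_cons, Option.some.injEq] at ht
      subst ht; exact h

theorem dcLoop_eq (ds : List Int) (d : Int) : dcLoop ds d = d + medFrom ds 0 := by
  induction ds, d using dcLoop.induct with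
  | case1 d => simp [dcLoop, medFrom]
  | case2 rest d ih =>
    have step : dcLoop (0 :: rest) d = dcLoop rest d := by rw [dcLoop]; simp
    have h0 : pvCost 0 0 = 0 := by unfold pvCost; split_ifs <;> omega
    rw [step, ih]
    simp [medFrom, h0]
  | case3 x rest d hx hp ih =>
    rw [dcLoop, dif_neg hx, dif_pos hp, ih]
    have hsplit : (x :: rest).takeWhile (fun y => decide (0 < y)) ++
        (x :: rest).dropWhile (fun y => decide (0 < y)) = x :: rest :=
      List.takeWhile_append_dropWhile
    have htw : (x :: rest).takeWhile (fun y => decide (0 < y)) =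
        x :: rest.takeWhile (fun y => decide (0 < y)) := by
      simp [hp]
    have hmem : ∀ y ∈ rest.takeWhile (fun y => decide (0 < y)), 0 < y := by
      intro y hy
      have := List.mem_takeWhile_imp hy
      simpa using this
    have hhd : ∀ t, ((x :: rest).dropWhile (fun y => decide (0 < y))).head? = some t → ¬ 0 < t := by
      intro t ht
      have := head?_dropWhile_not (x :: rest) t ht
      simpa using this
    have hop := medFrom_op_pos x (rest.takeWhile (fun y => decide (0 < y)))
      ((x :: rest).dropWhile (fun y => decide (0 < y))) hp hmem hhd
    rw [← htw] at hop
    rw [hsplit] at hop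
    rw [hop]
    ring
  | case4 x rest d hx hp ih =>
    have hneg : x < 0 := by omega
    rw [dcLoop, dif_neg hx, dif_neg hp, ih]
    have hsplit : (x :: rest).takeWhile (fun y => decide (y < 0)) ++
        (x :: rest).dropWhile (fun y => decide (y < 0)) = x :: rest :=
      List.takeWhile_append_dropWhile
    have htw : (x :: rest).takeWhile (fun y => decide (y < 0)) =
        x :: rest.takeWhile (fun y => decide (y < 0)) := by
      simp [hneg]
    have hmem : ∀ y ∈ rest.takeWhile (fun y => decide (y < 0)), y < 0 := by
      intro y hy
      have := List.mem_takeWhile_imp hy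
      simpa using this
    have hhd : ∀ t, ((x :: rest).dropWhile (fun y => decide (y < 0))).head? = some t → ¬ t < 0 := by
      intro t ht
      have := head?_dropWhile_not (x :: rest) t ht
      simpa using this
    have hop := medFrom_op_neg x (rest.takeWhile (fun y => decide (y < 0)))
      ((x :: rest).dropWhile (fun y => decide (y < 0))) hneg hmem hhd
    rw [← htw] at hop
    rw [hsplit] at hop
    rw [hop]
    ring

theorem zipWith_sub_maps (l : List (Int × Int)) :
    List.zipWith (· - ·) (l.map Prod.fst) (l.map Prod.snd) = l.map (fun p => p.1 - p.2) := by
  induction l with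
  | nil => rfl
  | cons p rest ih => simp [ih]

theorem distcalc_eq (a b : List Int) (h : a.length = b.length) :
    distcalc_optimized a b = medFrom (List.zipWith (· - ·) a b) 0 := by
  unfold distcalc_optimized
  rw [if_neg (by omega)]
  by_cases h1 : a.length = 1
  · rw [if_pos h1]
    match a, b with
    | [x], [y] =>
      simp only [List.headD, List.zipWith, medFrom, add_zero]
      unfold pvCost
      rcases lt_trichotomy (x - y) 0 with hlt | heq | hgt
      · rw [abs_of_neg (by omega)]
        simp only [max_def, min_def]
        split_ifs <;> omega
      · rw [show x - y = 0 from heq]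
        simp
      · rw [abs_of_pos (by omega)]
        simp only [max_def, min_def]
        split_ifs <;> omega
    | [x], y1 :: y2 :: ys => simp at h
    | [x], [] => simp at h
  · rw [if_neg h1, dcLoop_eq]
    ring

theorem zdLoop_eq (n1 n2 : List Int) : ∀ (k i : Nat) (t1 t2 : List Int),
    n1.length - i ≤ k →
    t1.length = t2.length →
    (n1.length ≤ n2.length ∨
      ∃ j, i ≤ j ∧ j < n1.length ∧ j < n2.length ∧ n1.getD j 0 = 0 ∧ n2.getD j 0 ≠ 0) →
    zdLoop n1 n2 i t1 t2 =
      if ((n1.drop i).zip (n2.drop i)).any (fun p => decide (p.1 = 0) && decide (p.2 ≠ 0))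
      then 1000000
      else distcalc_optimized (t1 ++ ((n1.drop i).zip (n2.drop i)).map Prod.fst)
        (t2 ++ ((n1.drop i).zip (n2.drop i)).map Prod.snd) := by
  intro k
  induction k with
  | zero =>
    intro i t1 t2 hk hlen _hpre
    have hi : ¬ i < n1.length := by omega
    rw [zdLoop, if_neg hi]
    have hd1 : n1.drop i = [] := List.drop_eq_nil_of_le (by omega)
    rw [hd1]
    simp [List.zip]
  | succ k ihk =>
    intro i t1 t2 hk hlen hpre
    by_cases hi : i < n1.length
    · by_cases hi2 : i < n2.length
      · have hk' : n1.length - (i + 1) ≤ k := by omega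
        have hget : PySem.List.pyGet? n2 (i : Int) = some (n2.getD i 0) := by
          rw [PySem.List.pyGet?_natCast]
          simp [List.getElem?_eq_getElem hi2]
        have hdrop1 : n1.drop i = n1.getD i 0 :: n1.drop (i + 1) := by
          rw [List.getD_eq_getElem n1 0 hi]; exact List.drop_eq_getElem_cons hi
        have hdrop2 : n2.drop i = n2.getD i 0 :: n2.drop (i + 1) := by
          rw [List.getD_eq_getElem n2 0 hi2]; exact List.drop_eq_getElem_cons hi2
        set x1 := n1.getD i 0 with hx1def
        set x2 := n2.getD i 0 with hx2def
        have hzip : (n1.drop i).zip (n2.drop i) =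
            (x1, x2) :: (n1.drop (i + 1)).zip (n2.drop (i + 1)) := by
          rw [hdrop1, hdrop2]; rfl
        by_cases hm : x1 = 0 ∧ x2 ≠ 0
        · -- returns 1000000; head pair is a mismatch
          have hany : ((n1.drop i).zip (n2.drop i)).any
              (fun p => decide (p.1 = 0) && decide (p.2 ≠ 0)) = true := by
            rw [hzip]; simp [hm.1, hm.2]
          rw [hany, if_pos rfl, zdLoop, if_pos hi, hget]
          simp only
          rw [if_pos hm.1, if_neg hm.2]
        · -- appends and recurses
          have hp2 : n1.length ≤ n2.length ∨
              ∃ j, i + 1 ≤ j ∧ j < n1.length ∧ j < n2.length ∧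
                n1.getD j 0 = 0 ∧ n2.getD j 0 ≠ 0 := by
            rcases hpre with h | ⟨j, hij, hj1, hj2, hz1, hz2⟩
            · exact Or.inl h
            · right
              refine ⟨j, ?_, hj1, hj2, hz1, hz2⟩
              rcases Nat.eq_or_lt_of_le hij with heq | hlt
              · exfalso; apply hm; subst heq; exact ⟨hz1, hz2⟩
              · omega
          have hrecval := ihk (i + 1) (t1 ++ [x1]) (t2 ++ [x2]) hk' (by simp [hlen]) hp2
          have hbranch : zdLoop n1 n2 i t1 t2 = zdLoop n1 n2 (i + 1) (t1 ++ [x1]) (t2 ++ [x2]) := by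
            rw [zdLoop, if_pos hi, hget]
            simp only
            by_cases h1 : x1 = 0
            · have h2 : x2 = 0 := by by_contra h2; exact hm ⟨h1, h2⟩
              rw [if_pos h1, if_pos h2]
            · rw [if_neg h1]
          rw [hbranch, hrecval, hzip]
          have hhm : ¬ (decide (x1 = 0) && decide (x2 ≠ 0)) = true := by simpa using hm
          simp only [List.any_cons, hhm, Bool.false_or, List.map_cons]
          split_ifs with h
          · rfl
          · simp [List.append_assoc]
      · -- n2[i] out of range: excluded by the hypothesis
        exfalso
        rcases hpre with h | ⟨j, hij, hj1, hj2, _⟩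
        · omega
        · omega
    · rw [zdLoop, if_neg hi]
      have hd1 : n1.drop i = [] := List.drop_eq_nil_of_le (by omega)
      rw [hd1]
      simp [List.zip]

-- ===== VERDICT (by name: the statement is the Claim_ definition above) =====
theorem zerodisthelper_optimized_spec : Claim_equal_zerodisthelper_optimized := by
  intro node1 node2 _hdom hpre
  unfold Spec_zerodisthelper_optimized zerodisthelper_optimized zerodisthelper_optimized_alt
  have hpre' : node1.length ≤ node2.length ∨
      ∃ j, 0 ≤ j ∧ j < node1.length ∧ j < node2.length ∧
        node1.getD j 0 = 0 ∧ node2.getD j 0 ≠ 0 := by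
    rcases hpre with h | ⟨j, hj1, hj2, hz1, hz2⟩
    · exact Or.inl h
    · exact Or.inr ⟨j, Nat.zero_le j, hj1, hj2, hz1, hz2⟩
  rw [zdLoop_eq node1 node2 node1.length 0 [] [] (by omega) rfl hpre', altLoop_eq]
  simp only [List.drop_zero, List.nil_append]
  split_ifs with h
  · rfl
  · rw [distcalc_eq _ _ (by simp), zipWith_sub_maps]
    ring
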